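-- pv_equiv track=rewrite | github.com/wgrech98/RMSCodeImplementation | project/CN2/CN2Algorithm.py | specialisation_process
-- ===== SOURCE A (Python) =====
-- import copy
-- import collections as col
--
-- def specialisation_process(target_complexes, selectors):
--     """
--     Function which expects a complex (a list of tuples) as input and
--     performs the CN2 specialisation process to specialise the complexes
--     in the "star". In the process, it adds ddtional conjunctions using
--     all the possible selectors.
--
--     Returns a list of new, specialised complexes.
--     """
--
--     provisional_specialised_rules = []
--     for targ_complex in target_complexes:
--         for selector in selectors:
--             # check to see if target complex is a single tuple otherwise assume list of tuples
--             if type(targ_complex) == tuple: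
--                 comp_to_specialise = [copy.copy(targ_complex)]
--             else:
--                 comp_to_specialise = copy.copy(targ_complex)
--
--             comp_to_specialise.append(selector[0])
--
--             # count if any selector is duplicated, append rule if not
--             number_of_selectors_in_complex = col.Counter(
--                 comp_to_specialise)
--             flag = True
--             for count in number_of_selectors_in_complex.values():
--                 if count > 1:
--                     flag = False
--
--             if flag == True:
--                 provisional_specialised_rules.append(comp_to_specialise)
--
--     return provisional_specialised_rules
-- ===== SOURCE B (Python) =====
-- def specialisation_process(target_complexes, selectors):
--     provisional_specialised_rules = []
--     for targ_complex in target_complexes: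
--         # normalise: a bare tuple becomes a one-element complex
--         base = [targ_complex] if type(targ_complex) == tuple else list(targ_complex)
--         seen = set(base)
--         if len(seen) != len(base):
--             continue  # base already carries a duplicate: no specialisation survives
--         for selector in selectors:
--             if selector[0] not in seen:
--                 provisional_specialised_rules.append(base + [selector[0]])
--     return provisional_specialised_rules
-- ===== Notes on version B (the rewrite author's own statement) =====
-- stated objective: alternative
-- what changed: B hoists the duplicate test out of the inner loop: per complex it builds a set once and decides duplicate-freeness once, then keeps a selector with a single membership check, instead of A's rebuilding a Counter of the extended complex and scanning its counts for every (complex, selector) pair.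
import Mathlib
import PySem

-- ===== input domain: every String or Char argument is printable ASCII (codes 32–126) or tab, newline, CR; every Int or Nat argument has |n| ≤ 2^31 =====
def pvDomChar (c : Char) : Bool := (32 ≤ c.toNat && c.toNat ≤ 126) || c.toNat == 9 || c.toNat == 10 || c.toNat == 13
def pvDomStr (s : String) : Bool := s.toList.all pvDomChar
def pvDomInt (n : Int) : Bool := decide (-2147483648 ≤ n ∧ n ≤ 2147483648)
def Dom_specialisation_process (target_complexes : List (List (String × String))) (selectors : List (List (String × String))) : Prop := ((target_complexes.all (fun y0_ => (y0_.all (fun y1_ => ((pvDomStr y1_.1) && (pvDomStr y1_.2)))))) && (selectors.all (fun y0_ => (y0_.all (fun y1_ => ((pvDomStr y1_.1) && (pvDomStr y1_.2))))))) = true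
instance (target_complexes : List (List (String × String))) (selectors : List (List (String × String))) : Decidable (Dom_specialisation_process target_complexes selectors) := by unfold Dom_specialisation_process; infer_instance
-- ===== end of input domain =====

-- B hoists A's per-pair Counter duplicate test into a per-complex set and a single membership check per selector (alternative decomposition; return value only, no mutation).
-- ===== PORT A =====
-- Python's 'type(targ_complex) == tuple' branch is unreachable under the type convention
-- (every element of target_complexes is a list of pairs), so only the list branch is ported.
-- 'selector[0]' is ported totally via pyGetD; Pre_ excludes the empty selectors where Python raises IndexError.
def specialisation_process (target_complexes : List (List (String × String))) (selectors : List (List (String × String))) : List (List (String × String)) :=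
  target_complexes.foldl (fun acc targ_complex =>
    selectors.foldl (fun acc selector =>
      let comp_to_specialise := targ_complex ++ [PySem.List.pyGetD selector 0 ("", "")]
      let number_of_selectors_in_complex := PySem.Dict.counter comp_to_specialise
      let flag := number_of_selectors_in_complex.values.foldl
        (fun flag count => if count > 1 then false else flag) true
      if flag = true then acc ++ [comp_to_specialise] else acc) acc) []

-- ===== PORT B =====
def specialisation_process_alt (target_complexes : List (List (String × String))) (selectors : List (List (String × String))) : List (List (String × String)) :=
  target_complexes.foldl (fun acc base =>
    let seen : PySem.Set (String × String) := PySem.Set.ofList base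
    if seen.length ≠ base.length then acc
    else selectors.foldl (fun acc selector =>
      let h := PySem.List.pyGetD selector 0 ("", "")
      if PySem.Set.contains seen h then acc
      else acc ++ [base ++ [h]]) acc) []

-- ===== PRECONDITION & SPEC =====
-- Pre_ excludes exactly the inputs where Python A raises IndexError on 'selector[0]':
-- an empty selector reached by the inner loop (i.e. with at least one target complex).
def Pre_specialisation_process (target_complexes : List (List (String × String))) (selectors : List (List (String × String))) : Prop :=
  target_complexes = [] ∨ ∀ s ∈ selectors, s ≠ []
instance (target_complexes : List (List (String × String))) (selectors : List (List (String × String))) : Decidable (Pre_specialisation_process target_complexes selectors) := by unfold Pre_specialisation_process; infer_instance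
def pvWitness_specialisation_process : (List (List (String × String))) × (List (List (String × String))) :=
  ([[("a", "x")]], [[("b", "y")]])
def Spec_specialisation_process (target_complexes : List (List (String × String))) (selectors : List (List (String × String))) (out : List (List (String × String))) : Prop := out = specialisation_process_alt target_complexes selectors
instance (target_complexes : List (List (String × String))) (selectors : List (List (String × String))) (out : List (List (String × String))) : Decidable (Spec_specialisation_process target_complexes selectors out) := by unfold Spec_specialisation_process; infer_instance

-- ===== CLAIM (what is proved, stated in full; the proofs are below) =====
def Claim_equal_specialisation_process : Prop := ∀ (target_complexes : List (List (String × String))) (selectors : List (List (String × String))), Dom_specialisation_process target_complexes selectors → Pre_specialisation_process target_complexes selectors → Spec_specialisation_process target_complexes selectors (specialisation_process target_complexes selectors)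

-- ===== LEMMAS AND PROOFS =====
lemma pv_foldl_flag (l : List Int) (b : Bool) :
    l.foldl (fun flag count => if count > 1 then false else flag) b
      = (b && l.all (fun c => !(c > 1))) := by
  induction l generalizing b with
  | nil => simp
  | cons x xs ih =>
      rw [List.foldl_cons, ih]
      by_cases h : x > 1 <;> cases b <;> simp [h]

lemma pv_setlen_eq_nodup (xs : List (String × String)) :
    ((PySem.Set.ofList xs).length = xs.length) ↔ xs.Nodup := by
  constructor
  · intro h
    have hperm : (PySem.Set.ofList xs).Perm xs.dedup := by
      apply List.perm_of_nodup_nodup_toFinset_eq (PySem.Set.nodup_ofList xs) xs.nodup_dedup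
      ext a
      simp [PySem.Set.mem_ofList]
    have hlen : xs.dedup.length = xs.length := by rw [← hperm.length_eq, h]
    have : xs.dedup = xs := (List.dedup_sublist xs).eq_of_length hlen
    exact List.dedup_eq_self.mp this
  · intro h; rw [PySem.Set.ofList_eq_self_of_nodup xs h]

lemma pv_flag_eq_nodup (xs : List (String × String)) :
    ((PySem.Dict.counter xs).values.foldl
        (fun flag count => if count > 1 then false else flag) true) = decide xs.Nodup := by
  have hv : (PySem.Dict.counter xs).values
      = (PySem.Set.ofList xs).map (fun k => ((xs.count k : Int))) := by
    show ((PySem.Dict.counter xs).items).map (·.2) = _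
    rw [PySem.Dict.items_counter]; simp
  rw [pv_foldl_flag, hv]
  simp only [Bool.true_and, List.all_map]
  rcases Bool.eq_false_or_eq_true (decide xs.Nodup) with hnd | hnd <;> rw [hnd]
  · have hnd' : xs.Nodup := of_decide_eq_true hnd
    rw [List.nodup_iff_count_le_one] at hnd'
    simp only [List.all_eq_true]
    intro a _
    have h1 := hnd' a
    simp only [Function.comp_apply]
    simp only [Bool.not_eq_true', decide_eq_false_iff_not, not_lt]
    exact_mod_cast h1
  · have hnd' : ¬ xs.Nodup := of_decide_eq_false hnd
    rw [List.nodup_iff_count_le_one] at hnd'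
    simp only [not_forall, not_le] at hnd'
    obtain ⟨a, ha⟩ := hnd'
    have hmem : a ∈ PySem.Set.ofList xs := by
      rw [PySem.Set.mem_ofList]
      exact List.count_pos_iff.mp (by omega)
    simp only [List.all_eq_false]
    refine ⟨a, hmem, ?_⟩
    have h1 : 1 < xs.count a := by omega
    simp only [Function.comp_apply]
    intro hc
    rw [Bool.not_eq_true', decide_eq_false_iff_not] at hc
    exact hc (by exact_mod_cast h1)

lemma pv_nodup_concat (base : List (String × String)) (x : String × String) :
    (base ++ [x]).Nodup ↔ base.Nodup ∧ x ∉ base := by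
  rw [← List.concat_eq_append, List.nodup_concat]
  tauto

lemma pv_inner_eq (base : List (String × String)) (sels : List (List (String × String))) (acc : List (List (String × String))) :
    sels.foldl (fun acc selector =>
      let comp := base ++ [PySem.List.pyGetD selector 0 ("", "")]
      let cnt := PySem.Dict.counter comp
      let flag := cnt.values.foldl (fun flag count => if count > 1 then false else flag) true
      if flag = true then acc ++ [comp] else acc) acc
    = (if (PySem.Set.ofList base).length ≠ base.length then acc
       else sels.foldl (fun acc selector =>
         let h := PySem.List.pyGetD selector 0 ("", "")
         if PySem.Set.contains (PySem.Set.ofList base) h then acc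
         else acc ++ [base ++ [h]]) acc) := by
  by_cases hb : (PySem.Set.ofList base).length = base.length
  · have hnd : base.Nodup := (pv_setlen_eq_nodup base).mp hb
    rw [if_neg (by simp [hb])]
    induction sels generalizing acc with
    | nil => rfl
    | cons s ss ih =>
        rw [List.foldl_cons, List.foldl_cons, ih]
        congr 1
        simp only [pv_flag_eq_nodup]
        have hmemiff : PySem.Set.contains (PySem.Set.ofList base) (PySem.List.pyGetD s 0 ("", ""))
            = decide ((PySem.List.pyGetD s 0 ("", "")) ∈ base) := by
          simp [PySem.Set.contains, PySem.Set.mem_ofList]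
        rw [hmemiff]
        by_cases hm : (PySem.List.pyGetD s 0 ("", "")) ∈ base
        · rw [if_neg (by simp [pv_nodup_concat, hm]), if_pos (by simpa using hm)]
        · rw [if_pos (by simp [pv_nodup_concat, hm, hnd]), if_neg (by simpa using hm)]
  · have hnd : ¬ base.Nodup := fun h => hb ((pv_setlen_eq_nodup base).mpr h)
    rw [if_pos (by simpa using hb)]
    induction sels generalizing acc with
    | nil => rfl
    | cons s ss ih =>
        rw [List.foldl_cons, ih]
        have hA : ¬ (base ++ [PySem.List.pyGetD s 0 ("", "")]).Nodup := by
          rw [pv_nodup_concat]; tauto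
        rw [if_neg (by rw [pv_flag_eq_nodup]; simpa using hA)]

-- ===== VERDICT (by name: the statement is the Claim_ definition above) =====
theorem specialisation_process_spec : Claim_equal_specialisation_process := by
  intro tcs sels hd hp
  clear hd hp
  unfold Spec_specialisation_process specialisation_process specialisation_process_alt
  induction tcs using List.reverseRecOn with
  | nil => rfl
  | append_singleton tcs comp ih =>
      rw [List.foldl_append, List.foldl_append, List.foldl_cons, List.foldl_nil,
        List.foldl_cons, List.foldl_nil, ih, pv_inner_eq]
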